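-- pv_equiv track=rewrite | github.com/claumiseimbett1/TEST-RFID | generar_epcs.py | _distribuir_en_categorias
-- ===== SOURCE A (Python) =====
-- from typing import List, Dict
--
-- def _distribuir_en_categorias(total: int, categorias: List[str]) -> Dict[str, int]:
--     """
--     Distribuye nadadores equitativamente entre categorías
--     Retorna dict {categoria: cantidad}
--     """
--     if total == 0 or not categorias:
--         return {cat: 0 for cat in categorias}
--
--     # Distribución base
--     por_categoria = total // len(categorias)
--     resto = total % len(categorias)
--
--     distribucion = {}
--     for i, cat in enumerate(categorias):
--         distribucion[cat] = por_categoria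
--         # Distribuir el resto en las primeras categorías
--         if i < resto:
--             distribucion[cat] += 1
--
--     return distribucion
-- ===== SOURCE B (Python) =====
-- from typing import List, Dict
--
-- def _distribuir_en_categorias(total: int, categorias: List[str]) -> Dict[str, int]:
--     """Distribucion greedy: a cada categoria le toca el techo de lo que queda
--     entre las categorias restantes; se descuenta y se sigue."""
--     distribucion = {}
--     restante = total
--     faltan = len(categorias)
--     for cat in categorias:
--         cuota = -(-restante // faltan)
--         distribucion[cat] = cuota
--         restante -= cuota
--         faltan -= 1
--     return distribucion
-- ===== Notes on version B (the rewrite author's own statement) =====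
-- stated objective: alternative
-- what changed: Replaces the precomputed base//remainder split and the 'if i < resto' increment by a greedy running-remainder loop: each category gets the ceiling of the remaining total over the remaining categories, which is subtracted before moving on; the total==0 special case disappears.
import Mathlib
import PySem

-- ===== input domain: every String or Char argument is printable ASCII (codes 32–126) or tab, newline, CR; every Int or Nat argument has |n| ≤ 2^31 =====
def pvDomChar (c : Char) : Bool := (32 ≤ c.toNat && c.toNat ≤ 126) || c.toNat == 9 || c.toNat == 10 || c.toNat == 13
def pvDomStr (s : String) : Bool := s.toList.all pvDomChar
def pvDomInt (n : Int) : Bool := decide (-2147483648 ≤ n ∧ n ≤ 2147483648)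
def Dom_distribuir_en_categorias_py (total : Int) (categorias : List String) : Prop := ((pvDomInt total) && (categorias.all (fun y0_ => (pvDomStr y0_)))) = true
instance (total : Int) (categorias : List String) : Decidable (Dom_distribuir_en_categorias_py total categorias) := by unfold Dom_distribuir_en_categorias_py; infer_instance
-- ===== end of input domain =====

-- B replaces A's precomputed base/remainder bookkeeping by a greedy running-remainder loop:
-- each category gets ceil(remaining/left) which is subtracted; same return value everywhere.

-- ===== PORT A =====
def distribuir_en_categorias_py (total : Int) (categorias : List String) : List (String × Int) :=
  if total = 0 ∨ categorias = [] then
    (categorias.foldl (fun d cat => d.insert cat 0) PySem.Dict.empty).items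
  else
    let n : Int := categorias.length
    let por_categoria := PySem.Int.floordiv total n
    let resto := PySem.Int.mod total n
    ((PySem.List.enumerate categorias).foldl
      (fun d p =>
        let d' := d.insert p.2 por_categoria
        if p.1 < resto then d'.modify p.2 0 (· + 1) else d')
      PySem.Dict.empty).items

-- ===== PORT B =====
def distribuir_en_categorias_py_alt (total : Int) (categorias : List String) : List (String × Int) :=
  (categorias.foldl
    (fun st cat =>
      let cuota := -(PySem.Int.floordiv (-st.2.1) st.2.2)
      (st.1.insert cat cuota, st.2.1 - cuota, st.2.2 - 1))
    ((PySem.Dict.empty : PySem.Dict String Int), total, (categorias.length : Int))).1.items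

-- ===== PRECONDITION & SPEC =====
def Spec_distribuir_en_categorias_py (total : Int) (categorias : List String) (out : List (String × Int)) : Prop := out = distribuir_en_categorias_py_alt total categorias
instance (total : Int) (categorias : List String) (out : List (String × Int)) : Decidable (Spec_distribuir_en_categorias_py total categorias out) := by unfold Spec_distribuir_en_categorias_py; infer_instance

-- ===== CLAIM (what is proved, stated in full; the proofs are below) =====
def Claim_equal_distribuir_en_categorias_py : Prop := ∀ (total : Int) (categorias : List String), Dom_distribuir_en_categorias_py total categorias → Spec_distribuir_en_categorias_py total categorias (distribuir_en_categorias_py total categorias)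

-- ===== LEMMAS AND PROOFS =====

-- inserting then modifying the same key is inserting the modified value
lemma insert_modify_self (d : PySem.Dict String Int) (k : String) (v w : Int) (f : Int → Int) :
    (d.insert k v).modify k w f = d.insert k (f v) := by
  simp [PySem.Dict.modify, PySem.Dict.getD_insert_self, PySem.Dict.insert_insert_self]

-- the greedy ceiling of q*m + e over m (0 ≤ e ≤ m, m > 0) is q plus one iff anything is left over
lemma ceil_val (q m e : Int) (hm : 0 < m) (he0 : 0 ≤ e) (hem : e ≤ m) :
    -(PySem.Int.floordiv (-(q * m + e)) m) = q + (if 0 < e then 1 else 0) := by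
  rw [PySem.Int.neg_floordiv_neg_eq_iff_of_pos hm]
  split_ifs with h <;> constructor <;> nlinarith

-- A's enumerate-fold and B's running-remainder fold build the same dict
lemma fold_eq (q r n : Int) (hrn : r < n) :
    ∀ (l : List String) (s : Int) (d : PySem.Dict String Int),
      0 ≤ s → s + l.length = n →
      (PySem.List.enumerate l s).foldl
          (fun d p =>
            let d' := d.insert p.2 q
            if p.1 < r then d'.modify p.2 0 (· + 1) else d') d
        = (l.foldl
            (fun st cat =>
              let cuota := -(PySem.Int.floordiv (-st.2.1) st.2.2)
              (st.1.insert cat cuota, st.2.1 - cuota, st.2.2 - 1))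
            (d, q * (n - s) + (r - min s r), n - s)).1 := by
  intro l
  induction l with
  | nil => intro s d _ _; rfl
  | cons x xs ih =>
    intro s d hs hlen
    simp only [PySem.List.enumerate_cons, List.foldl_cons, List.length_cons] at *
    have hsn : s < n := by push_cast at hlen ⊢; omega
    have hcuota :
        -(PySem.Int.floordiv (-(q * (n - s) + (r - min s r))) (n - s))
          = q + (if s < r then 1 else 0) := by
      rw [ceil_val q (n - s) (r - min s r) (by omega) (by omega) (by omega)]
      congr 1
      split_ifs <;> omega
    have hstep :
        (let d' := d.insert x q
         if s < r then d'.modify x 0 (· + 1) else d')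
          = d.insert x (q + (if s < r then 1 else 0)) := by
      split_ifs with h <;> simp [insert_modify_self]
    rw [hstep]
    have hrec := ih (s + 1) (d.insert x (q + (if s < r then 1 else 0)))
      (by omega) (by push_cast at hlen ⊢; omega)
    have h2 : q * (n - (s + 1)) + (r - min (s + 1) r)
        = q * (n - s) + (r - min s r) - (q + (if s < r then 1 else 0)) := by
      split_ifs with h
      · rw [min_eq_left (by omega), min_eq_left (by omega)]; ring
      · rw [min_eq_right (by omega), min_eq_right (by omega)]; ring
    rw [h2, show n - (s + 1) = n - s - 1 from by ring] at hrec
    rw [hcuota, hrec]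

-- with restante = 0 B's greedy loop inserts 0 for every category
lemma fold_zero :
    ∀ (l : List String) (m : Int) (d : PySem.Dict String Int),
      (l.foldl
        (fun st cat =>
          let cuota := -(PySem.Int.floordiv (-st.2.1) st.2.2)
          (st.1.insert cat cuota, st.2.1 - cuota, st.2.2 - 1))
        (d, (0 : Int), m)).1
      = l.foldl (fun d cat => d.insert cat 0) d := by
  intro l
  induction l with
  | nil => intro m d; rfl
  | cons x xs ih =>
    intro m d
    simp only [List.foldl_cons]
    have h0 : -(PySem.Int.floordiv (-(0 : Int)) m) = 0 := by
      simp [PySem.Int.floordiv]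
    simp only [h0, sub_zero]
    exact ih (m - 1) (d.insert x 0)

-- ===== VERDICT (by name: the statement is the Claim_ definition above) =====
theorem distribuir_en_categorias_py_spec : Claim_equal_distribuir_en_categorias_py := by
  intro total categorias _
  unfold Spec_distribuir_en_categorias_py distribuir_en_categorias_py distribuir_en_categorias_py_alt
  by_cases hc : categorias = []
  · subst hc; simp
  · have hn : 0 < (categorias.length : Int) := by
      have := List.length_pos_iff.mpr hc; omega
    by_cases ht : total = 0
    · subst ht
      simp only [true_or, if_true]
      exact (congrArg PySem.Dict.items
        (fold_zero categorias (categorias.length : Int) PySem.Dict.empty)).symm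
    · simp only [ht, false_or, hc, if_false]
      have hsum := PySem.Int.floordiv_mul_add_mod total (categorias.length : Int)
      have h := fold_eq (PySem.Int.floordiv total (categorias.length : Int))
        (PySem.Int.mod total (categorias.length : Int)) (categorias.length : Int)
        (PySem.Int.mod_lt total hn)
        categorias 0 PySem.Dict.empty le_rfl (by omega)
      rw [show (PySem.Int.floordiv total (categorias.length : Int)) * ((categorias.length : Int) - 0)
            + (PySem.Int.mod total (categorias.length : Int) - min 0 (PySem.Int.mod total (categorias.length : Int)))
          = total from by
        rw [min_eq_left (PySem.Int.mod_nonneg total hn), sub_zero, sub_zero]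
        exact hsum] at h
      exact congrArg PySem.Dict.items h
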